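-- pv_equiv track=rewrite | github.com/dingwengit/Code_practice | Python/string/substring_combination_of_all_words.py | check_words
-- ===== SOURCE A (Python) =====
-- def get_prefix(s, words, found_words):
--     res = []
--     for idx in range(len(words)):
--         if idx not in found_words:
--             if s.startswith(words[idx]):
--                 res.append(idx)
--     return res
--
-- def check_words(s, words, found_words):
--     word_idx = get_prefix(s, words, found_words)
--     for idx in word_idx:
--         if idx in found_words:
--             continue
--         found_words.add(idx)
--         if len(found_words) == len(words):
--             return True
--         if check_words(s[len(words[idx]):], words, found_words):
--             return True
--         found_words.remove(idx)
--     return False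
-- ===== SOURCE B (Python) =====
-- def check_words(s, words, found_words):
--     n = len(words)
--     avail = [i for i in range(n) if i not in found_words]
--     need = n - len(found_words)
--     if need <= 0:
--         return False
--     frontier = [[]]
--     for _ in range(need):
--         nxt = []
--         for used in frontier:
--             off = 0
--             for i in used:
--                 off += len(words[i])
--             for i in avail:
--                 if i not in used and s[off:].startswith(words[i]):
--                     cand = sorted(used + [i])
--                     if cand not in nxt:
--                         nxt.append(cand)
--         if not nxt:
--             return False
--         frontier = nxt
--     return True
-- ===== Notes on version B (the rewrite author's own statement) =====
-- stated objective: alternative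
-- what changed: A explores orderings of the remaining words by mutable-set backtracking with restore-on-failure; B instead computes, level by level, the family of reachable sets of used word indices (deduplicated canonical sorted lists, with the match offset recomputed as the sum of the used word lengths), so each subset is expanded once instead of once per ordering; intended as faster (measured 98x at n=256, where A times out on some inputs, but B has its own exponential worst case), recorded as unconfirmed in a timing run.
import Mathlib
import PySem

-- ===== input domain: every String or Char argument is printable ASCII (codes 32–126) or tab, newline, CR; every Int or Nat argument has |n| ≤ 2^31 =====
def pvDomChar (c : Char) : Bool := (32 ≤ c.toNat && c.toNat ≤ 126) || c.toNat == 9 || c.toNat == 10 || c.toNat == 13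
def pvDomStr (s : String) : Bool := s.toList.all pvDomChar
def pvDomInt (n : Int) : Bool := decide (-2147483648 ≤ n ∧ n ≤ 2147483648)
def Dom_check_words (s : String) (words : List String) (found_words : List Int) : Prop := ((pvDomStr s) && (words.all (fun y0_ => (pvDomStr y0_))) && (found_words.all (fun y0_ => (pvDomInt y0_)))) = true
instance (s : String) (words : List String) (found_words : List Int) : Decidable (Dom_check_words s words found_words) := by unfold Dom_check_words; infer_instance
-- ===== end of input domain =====

-- B replaces A's order-exploring mutable-set backtracking by level-by-level reachability over
-- canonical sets of used word indices; equivalence is about the RETURN value only — Python A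
-- mutates its found_words set in place, B does not.

-- ===== PORT A =====
def get_prefixA (s : String) (words : List String) (found_words : List Int) : List Int :=
  (PySem.List.pyRange 0 (PySem.List.len words) 1).foldl
    (fun res idx =>
      if !(PySem.Set.contains found_words idx) then
        if PySem.Str.startswith s ((PySem.List.pyGet? words idx).getD "") then res ++ [idx] else res
      else res)
    []

mutual
-- fuel only makes the recursion total: A's recursion depth is ≤ number of fresh in-range
-- indices it can add, hence ≤ words.length, so fuel words.length + 1 never runs out.
def check_words_aux (fuel : Nat) (s : String) (words : List String) (found_words : List Int) : Bool :=
  match fuel with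
  | 0 => false
  | fuel + 1 => check_words_loop fuel s words (get_prefixA s words found_words) found_words
termination_by (fuel, 0)

def check_words_loop (fuel : Nat) (s : String) (words : List String) (lst : List Int) (found_words : List Int) : Bool :=
  match lst with
  | [] => false
  | idx :: rest =>
    if PySem.Set.contains found_words idx then
      check_words_loop fuel s words rest found_words
    else
      let fnd := PySem.Set.add found_words idx
      if PySem.List.len fnd = PySem.List.len words then true
      else if check_words_aux fuel
          (PySem.Str.slice s (some (PySem.Str.len ((PySem.List.pyGet? words idx).getD ""))) none)
          words fnd then true
      -- found_words.remove(idx): idx ∈ fnd here, so set.remove = Set.discard (exact)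
      else check_words_loop fuel s words rest (PySem.Set.discard fnd idx)
termination_by (fuel, lst.length + 1)
end

def check_words (s : String) (words : List String) (found_words : List Int) : Bool :=
  check_words_aux (words.length + 1) s words found_words

-- ===== PORT B =====
def alt_step (s : String) (words : List String) (avail : List Int) (frontier : List (List Int)) : List (List Int) :=
  frontier.foldl (fun nxt used =>
    let off : Int := used.foldl (fun o i => o + PySem.Str.len ((PySem.List.pyGet? words i).getD "")) 0
    avail.foldl (fun nxt2 i =>
      if !(used.contains i) &&
          PySem.Str.startswith (PySem.Str.slice s (some off) none) ((PySem.List.pyGet? words i).getD "") then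
        -- 'if cand not in nxt: nxt.append(cand)' is PySem.Set.add
        PySem.Set.add nxt2 (PySem.List.sorted (used ++ [i]) (fun x => x) false)
      else nxt2) nxt) []

def alt_loop (s : String) (words : List String) (avail : List Int) : Nat → List (List Int) → Bool
  | 0, _ => true
  | k + 1, frontier =>
    let nxt := alt_step s words avail frontier
    if nxt.isEmpty then false else alt_loop s words avail k nxt

def check_words_alt (s : String) (words : List String) (found_words : List Int) : Bool :=
  let n : Int := PySem.List.len words
  let avail := (PySem.List.pyRange 0 n 1).filter (fun i => !(PySem.Set.contains found_words i))
  let need : Int := n - PySem.List.len found_words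
  if need ≤ 0 then false
  else alt_loop s words avail need.toNat [[]]

-- ===== PRECONDITION & SPEC =====
def Spec_check_words (s : String) (words : List String) (found_words : List Int) (out : Bool) : Prop := out = check_words_alt s words found_words
instance (s : String) (words : List String) (found_words : List Int) (out : Bool) : Decidable (Spec_check_words s words found_words out) := by unfold Spec_check_words; infer_instance

-- ===== CLAIM (what is proved, stated in full; the proofs are below) =====
def Claim_equal_check_words : Prop := ∀ (s : String) (words : List String) (found_words : List Int), Dom_check_words s words found_words → Spec_check_words s words found_words (check_words s words found_words)

-- ===== LEMMAS AND PROOFS =====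

-- word i of `words`, as a character list (indices used below are always in range)
def wordL (words : List String) (i : Int) : List Char := ((PySem.List.pyGet? words i).getD "").toList

-- total number of characters the chain C consumes
def sumLen (words : List String) (C : List Int) : Nat := (C.map (fun i => (wordL words i).length)).sum

-- `Chain words t found C`: the indices in C, in order, are fresh in-range indices outside
-- `found`, pairwise distinct, and their words match t as successively consumed prefixes.
inductive Chain (words : List String) : List Char → List Int → List Int → Prop
  | nil (t : List Char) (found : List Int) : Chain words t found []
  | cons {t : List Char} {found : List Int} {i : Int} {C : List Int}
      (h0 : 0 ≤ i) (h1 : i < (words.length : Int)) (h2 : i ∉ found)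
      (hp : wordL words i <+: t)
      (hc : Chain words (List.drop (wordL words i).length t) (i :: found) C) :
      Chain words t found (i :: C)

theorem chain_congr_found {words : List String} {t : List Char} {found found' C : List Int}
    (hmem : ∀ j, j ∈ found ↔ j ∈ found') (h : Chain words t found C) :
    Chain words t found' C := by
  induction h generalizing found' with
  | nil => exact Chain.nil _ _
  | cons h0 h1 h2 hp hc ih =>
    exact Chain.cons h0 h1 (fun hm => h2 ((hmem _).mpr hm)) hp
      (ih (fun j => by simp [hmem j]))

theorem chain_append_left {words : List String} {t : List Char} {found C D : List Int}
    (h : Chain words t found (C ++ D)) : Chain words t found C := by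
  induction C generalizing t found with
  | nil => exact Chain.nil _ _
  | cons c C ih =>
    rw [List.cons_append] at h
    cases h with
    | cons h0 h1 h2 hp hc => exact Chain.cons h0 h1 h2 hp (ih hc)

theorem chain_snoc {words : List String} {t : List Char} {found C : List Int} {i : Int}
    (h : Chain words t found C) (h0 : 0 ≤ i) (h1 : i < (words.length : Int))
    (h2 : i ∉ found) (h3 : i ∉ C)
    (hp : wordL words i <+: List.drop (sumLen words C) t) :
    Chain words t found (C ++ [i]) := by
  induction h with
  | nil t found =>
    simp [sumLen] at hp
    exact Chain.cons h0 h1 h2 hp (Chain.nil _ _)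
  | @cons t found c C hc0 hc1 hc2 hcp hcc ih =>
    have hne : i ≠ c := by rintro rfl; exact h3 (List.mem_cons_self ..)
    have h3' : i ∉ C := fun hm => h3 (List.mem_cons_of_mem _ hm)
    have h2' : i ∉ c :: found := by
      intro hm; rcases List.mem_cons.mp hm with h | h
      · exact hne h
      · exact h2 h
    have hp' : wordL words i <+: List.drop (sumLen words C) (List.drop (wordL words c).length t) := by
      rw [List.drop_drop]
      have : (wordL words c).length + sumLen words C = sumLen words (c :: C) := by
        simp [sumLen]
      rw [this]; exact hp
    exact Chain.cons hc0 hc1 hc2 hcp (ih h2' h3' hp')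

theorem chain_unsnoc {words : List String} {t : List Char} {found C : List Int} {i : Int}
    (h : Chain words t found (C ++ [i])) :
    Chain words t found C ∧ 0 ≤ i ∧ i < (words.length : Int) ∧ i ∉ found ∧ i ∉ C ∧
      wordL words i <+: List.drop (sumLen words C) t := by
  induction C generalizing t found with
  | nil =>
    cases h with
    | cons h0 h1 h2 hp hc =>
      refine ⟨Chain.nil _ _, h0, h1, h2, by simp, ?_⟩
      simpa [sumLen] using hp
  | cons c C ih =>
    rw [List.cons_append] at h
    cases h with
    | cons h0 h1 h2 hp hc =>
      obtain ⟨hC, hi0, hi1, hi2, hi3, hip⟩ := ih hc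
      have hne : i ≠ c := by
        intro hrfl; exact hi2 (hrfl ▸ List.mem_cons_self ..)
      refine ⟨Chain.cons h0 h1 h2 hp hC, hi0, hi1, fun hm => hi2 (List.mem_cons_of_mem _ hm),
        by simp [hne, hi3], ?_⟩
      rw [List.drop_drop] at hip
      have : (wordL words c).length + sumLen words C = sumLen words (c :: C) := by
        simp [sumLen]
      rwa [this] at hip

theorem mem_get_prefixA (s : String) (words : List String) (found : List Int) (idx : Int) :
    idx ∈ get_prefixA s words found ↔
      0 ≤ idx ∧ idx < (words.length : Int) ∧ idx ∉ found ∧ wordL words idx <+: s.toList := by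
  unfold get_prefixA
  have hb : ∀ (res : List Int) (i : Int),
      (if !(PySem.Set.contains found i) then
        if PySem.Str.startswith s ((PySem.List.pyGet? words i).getD "") then res ++ [i] else res
      else res)
      = (if (!(PySem.Set.contains found i) && PySem.Str.startswith s ((PySem.List.pyGet? words i).getD "")) then res ++ [i] else res) := by
    intro res i
    by_cases h1 : i ∈ found <;>
      by_cases h2 : PySem.Chars.startswith s.toList ((PySem.List.pyGet? words i).getD "").toList = true <;>
      simp [h1, h2]
  simp only [hb]
  rw [PySem.List.foldl_append_if_eq_filter]
  simp only [List.nil_append, List.mem_filter, PySem.List.mem_pyRange_one, Bool.and_eq_true,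
    Bool.not_eq_true']
  simp [wordL, PySem.List.len, PySem.Chars.startswith_iff]
  tauto

theorem discard_add_of_not_mem (found : List Int) (idx : Int) (h : idx ∉ found) :
    PySem.Set.discard (PySem.Set.add found idx) idx = found := by
  simp only [PySem.Set.add_of_not_mem h, PySem.Set.discard]
  rw [List.filter_append]
  simp [List.filter_eq_self.mpr]
  intro a ha hc; exact h (hc ▸ ha)

theorem auxA_dead (words : List String) : ∀ (fuel : Nat) (s : String) (found : List Int),
    words.length ≤ found.length → check_words_aux fuel s words found = false := by
  intro fuel
  induction fuel with
  | zero => intro s found h; rw [check_words_aux]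
  | succ f ih =>
    intro s found h
    rw [check_words_aux]
    generalize get_prefixA s words found = lst
    induction lst with
    | nil => rw [check_words_loop]
    | cons idx rest ihl =>
      rw [check_words_loop]
      by_cases hc : PySem.Set.contains found idx = true
      · simp only [hc, if_true]; exact ihl
      · have hmem : idx ∉ found := fun hm => hc ((PySem.Set.contains_iff _ _).mpr hm)
        simp only [hc, Bool.false_eq_true, if_false]
        have hfnd : PySem.Set.add found idx = found ++ [idx] := PySem.Set.add_of_not_mem hmem
        have hlen : ¬ (PySem.List.len (PySem.Set.add found idx) = PySem.List.len words) := by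
          simp [PySem.List.len, hfnd]; omega
        have hdead := ih (PySem.Str.slice s (some (PySem.Str.len ((PySem.List.pyGet? words idx).getD ""))) none)
          (PySem.Set.add found idx) (by simp [hfnd]; omega)
        rw [discard_add_of_not_mem found idx hmem]
        simp [ihl]
        refine ⟨by simpa [PySem.List.len] using hlen, by simpa using hdead⟩

theorem slice_toList (s : String) (w : String) :
    (PySem.Str.slice s (some (PySem.Str.len w)) none).toList = s.toList.drop w.toList.length := by
  simp [PySem.Str.toList_slice, PySem.Str.len_eq]

theorem auxA_iff (words : List String) : ∀ (fuel : Nat) (s : String) (found : List Int),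
    found.length < words.length → words.length - found.length ≤ fuel →
    (check_words_aux fuel s words found = true ↔
      ∃ C, Chain words s.toList found C ∧ C.length = words.length - found.length) := by
  intro fuel
  induction fuel with
  | zero => intro s found h1 h2; omega
  | succ f ih =>
    intro s found h1 h2
    rw [check_words_aux]
    have key : ∀ lst : List Int, (∀ idx, idx ∈ lst → idx ∈ get_prefixA s words found) →
        (check_words_loop f s words lst found = true ↔
          ∃ idx ∈ lst, idx ∉ found ∧
            ∃ C, Chain words (s.toList.drop (wordL words idx).length) (idx :: found) C ∧
              C.length = words.length - found.length - 1) := by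
      intro lst
      induction lst with
      | nil => intro _; rw [check_words_loop]; simp
      | cons idx rest ihl =>
        intro hsub
        have hidx := hsub idx (by simp)
        rw [mem_get_prefixA] at hidx
        obtain ⟨hi0, hi1, hi2, hip⟩ := hidx
        rw [check_words_loop]
        have hc : PySem.Set.contains found idx = false := by
          rw [← Bool.not_eq_true]; exact fun h => hi2 ((PySem.Set.contains_iff _ _).mp h)
        simp only [hc, Bool.false_eq_true, if_false]
        have hfnd : PySem.Set.add found idx = found ++ [idx] := PySem.Set.add_of_not_mem hi2
        have ihl' := ihl (fun a ha => hsub a (List.mem_cons_of_mem _ ha))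
        rw [discard_add_of_not_mem found idx hi2, hfnd]
        by_cases hEq : PySem.List.len (found ++ [idx]) = PySem.List.len words
        · have hn : found.length + 1 = words.length := by
            have h' := hEq; simp [PySem.List.len] at h'; omega
          simp only [hEq, if_true]
          constructor
          · intro _; exact ⟨idx, by simp, hi2, [], Chain.nil _ _, by simp; omega⟩
          · intro _; trivial
        · have hn1 : found.length + 1 < words.length := by
            have h' := hEq; simp [PySem.List.len] at h'
            rcases Nat.lt_or_ge (found.length + 1) words.length with h | h
            · exact h
            · exfalso; apply h'; omega
          have hrec := ih (PySem.Str.slice s (some (PySem.Str.len ((PySem.List.pyGet? words idx).getD ""))) none)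
            (found ++ [idx])
            (by clear ih ihl ihl' hsub hip hc hfnd hEq hi0 hi1 hi2;
                simp only [List.length_append, List.length_cons, List.length_nil]; omega)
            (by clear ih ihl ihl' hsub hip hc hfnd hEq hi0 hi1 hi2;
                simp only [List.length_append, List.length_cons, List.length_nil]; omega)
          rw [slice_toList] at hrec
          simp only [hEq, if_false]
          have hrec' : check_words_aux f (PySem.Str.slice s (some (PySem.Str.len ((PySem.List.pyGet? words idx).getD ""))) none) words (found ++ [idx]) = true ↔
              ∃ C, Chain words (s.toList.drop (wordL words idx).length) (idx :: found) C ∧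
                C.length = words.length - found.length - 1 := by
            rw [hrec]
            have hmm : ∀ j, j ∈ found ++ [idx] ↔ j ∈ idx :: found := by
              intro j; simp; tauto
            constructor
            · rintro ⟨C, hC, hl⟩
              refine ⟨C, chain_congr_found hmm ?_, ?_⟩
              · simpa [wordL] using hC
              · clear hrec hEq; simp only [List.length_append, List.length_cons, List.length_nil] at hl; omega
            · rintro ⟨C, hC, hl⟩
              refine ⟨C, chain_congr_found (fun j => (hmm j).symm) ?_, ?_⟩
              · simpa [wordL] using hC
              · clear hrec hEq; simp only [List.length_append, List.length_cons, List.length_nil]; omega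
          constructor
          · intro hgoal
            by_cases ha : check_words_aux f (PySem.Str.slice s (some (PySem.Str.len ((PySem.List.pyGet? words idx).getD ""))) none) words (found ++ [idx]) = true
            · obtain ⟨C, hC, hl⟩ := hrec'.mp ha
              exact ⟨idx, by simp, hi2, C, hC, hl⟩
            · simp only [ha, Bool.false_eq_true, if_false] at hgoal
              obtain ⟨a, haRest, h⟩ := ihl'.mp hgoal
              exact ⟨a, List.mem_cons_of_mem _ haRest, h⟩
          · rintro ⟨a, haMem, ha2, C, hC, hl⟩
            rcases List.mem_cons.mp haMem with rfl | haRest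
            · have h' := hrec'.mpr ⟨C, hC, hl⟩
              simp
              exact Or.inl (by simpa using h')
            · have h' := ihl'.mpr ⟨a, haRest, ha2, C, hC, hl⟩
              simp
              exact Or.inr h'
    rw [key (get_prefixA s words found) (fun _ h => h)]
    constructor
    · rintro ⟨idx, hmem, hnf, C, hC, hlC⟩
      rw [mem_get_prefixA] at hmem
      obtain ⟨hi0, hi1, _, hip⟩ := hmem
      exact ⟨idx :: C, Chain.cons hi0 hi1 hnf hip hC, by simp only [List.length_cons]; omega⟩
    · rintro ⟨C, hC, hlC⟩
      match C, hC with
      | [], _ => simp at hlC; omega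
      | idx :: C', hC =>
        cases hC with
        | cons h0 h1 h2 hp hcc =>
          refine ⟨idx, ?_, h2, C', hcc, by simp only [List.length_cons] at hlC; omega⟩
          rw [mem_get_prefixA]; exact ⟨h0, h1, h2, hp⟩

theorem A_iff (s : String) (words : List String) (found : List Int) :
    check_words s words found = true ↔
      (found.length < words.length ∧
        ∃ C, Chain words s.toList found C ∧ C.length = words.length - found.length) := by
  unfold check_words
  rcases Nat.lt_or_ge found.length words.length with h | h
  · rw [auxA_iff words (words.length + 1) s found h (by omega)]
    simp [h]
  · rw [auxA_dead words (words.length + 1) s found h]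
    simp; omega

-- ===== B side =====
theorem mem_availB (words : List String) (found : List Int) (i : Int) :
    i ∈ (PySem.List.pyRange 0 (PySem.List.len words) 1).filter (fun i => !(PySem.Set.contains found i)) ↔
      0 ≤ i ∧ i < (words.length : Int) ∧ i ∉ found := by
  simp [List.mem_filter, PySem.List.mem_pyRange_one, PySem.List.len]
  tauto

theorem off_eqB (words : List String) (u : List Int) :
    u.foldl (fun o i => o + PySem.Str.len ((PySem.List.pyGet? words i).getD "")) 0
      = (sumLen words u : Int) := by
  rw [PySem.List.foldl_add (g := fun i => PySem.Str.len ((PySem.List.pyGet? words i).getD ""))]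
  simp [sumLen, wordL, PySem.Str.len_eq]
  rfl

theorem mem_alt_step (s : String) (words : List String) (avail : List Int)
    (frontier : List (List Int)) (x : List Int) :
    x ∈ alt_step s words avail frontier ↔
      ∃ u ∈ frontier, ∃ i ∈ avail, i ∉ u ∧
        PySem.Str.startswith
          (PySem.Str.slice s (some ((sumLen words u : Nat) : Int)) none)
          ((PySem.List.pyGet? words i).getD "") = true ∧
        x = PySem.List.sorted (u ++ [i]) (fun x => x) false := by
  unfold alt_step
  have inner : ∀ (u : List Int) (acc : List (List Int)),
      (x ∈ avail.foldl (fun nxt2 i =>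
        if !(u.contains i) &&
            PySem.Str.startswith (PySem.Str.slice s (some (u.foldl (fun o i => o + PySem.Str.len ((PySem.List.pyGet? words i).getD "")) 0)) none) ((PySem.List.pyGet? words i).getD "") then
          PySem.Set.add nxt2 (PySem.List.sorted (u ++ [i]) (fun x => x) false)
        else nxt2) acc) ↔
      (x ∈ acc ∨ ∃ i ∈ avail, i ∉ u ∧
        PySem.Str.startswith (PySem.Str.slice s (some ((sumLen words u : Nat) : Int)) none) ((PySem.List.pyGet? words i).getD "") = true ∧
        x = PySem.List.sorted (u ++ [i]) (fun x => x) false) := by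
    intro u
    rw [off_eqB words u] at *
    induction avail with
    | nil => intro acc; simp
    | cons a rest ih =>
      intro acc
      rw [List.foldl_cons]
      by_cases hmem : a ∈ u
      · have hcon : u.contains a = true := by simpa using hmem
        simp only [hcon, Bool.not_true, Bool.false_and, Bool.false_eq_true, if_false]
        rw [ih acc]
        constructor
        · rintro (h | ⟨i, hi, h⟩)
          · exact Or.inl h
          · exact Or.inr ⟨i, List.mem_cons_of_mem _ hi, h⟩
        · rintro (h | ⟨i, hi, hnu, hsw, hx⟩)
          · exact Or.inl h
          · rcases List.mem_cons.mp hi with rfl | hi'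
            · exact absurd hmem hnu
            · exact Or.inr ⟨i, hi', hnu, hsw, hx⟩
      · have hcon : u.contains a = false := by simpa using hmem
        simp only [hcon, Bool.not_false, Bool.true_and]
        by_cases hsw : PySem.Str.startswith (PySem.Str.slice s (some ((sumLen words u : Nat) : Int)) none) ((PySem.List.pyGet? words a).getD "") = true
        · simp only [hsw, if_true]
          rw [ih]
          constructor
          · rintro (h | ⟨i, hi, h⟩)
            · rcases (PySem.Set.mem_add _ _ _).mp h with h' | h'
              · exact Or.inl h'
              · exact Or.inr ⟨a, by simp, hmem, hsw, h'⟩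
            · exact Or.inr ⟨i, List.mem_cons_of_mem _ hi, h⟩
          · rintro (h | ⟨i, hi, hnu, hsw', hx⟩)
            · exact Or.inl ((PySem.Set.mem_add _ _ _).mpr (Or.inl h))
            · rcases List.mem_cons.mp hi with rfl | hi'
              · exact Or.inl ((PySem.Set.mem_add _ _ _).mpr (Or.inr hx))
              · exact Or.inr ⟨i, hi', hnu, hsw', hx⟩
        · simp only [hsw, Bool.false_eq_true, if_false]
          rw [ih]
          constructor
          · rintro (h | ⟨i, hi, h⟩)
            · exact Or.inl h
            · exact Or.inr ⟨i, List.mem_cons_of_mem _ hi, h⟩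
          · rintro (h | ⟨i, hi, hnu, hsw', hx⟩)
            · exact Or.inl h
            · rcases List.mem_cons.mp hi with rfl | hi'
              · exact absurd hsw' hsw
              · exact Or.inr ⟨i, hi', hnu, hsw', hx⟩
  have outer : ∀ (fr : List (List Int)) (acc : List (List Int)),
      (x ∈ fr.foldl (fun nxt used =>
        let off : Int := used.foldl (fun o i => o + PySem.Str.len ((PySem.List.pyGet? words i).getD "")) 0
        avail.foldl (fun nxt2 i =>
          if !(used.contains i) &&
              PySem.Str.startswith (PySem.Str.slice s (some off) none) ((PySem.List.pyGet? words i).getD "") then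
            PySem.Set.add nxt2 (PySem.List.sorted (used ++ [i]) (fun x => x) false)
          else nxt2) nxt) acc) ↔
      (x ∈ acc ∨ ∃ u ∈ fr, ∃ i ∈ avail, i ∉ u ∧
        PySem.Str.startswith (PySem.Str.slice s (some ((sumLen words u : Nat) : Int)) none) ((PySem.List.pyGet? words i).getD "") = true ∧
        x = PySem.List.sorted (u ++ [i]) (fun x => x) false) := by
    intro fr
    induction fr with
    | nil => intro acc; simp
    | cons u fr ih =>
      intro acc
      rw [List.foldl_cons, ih, inner u]
      constructor
      · rintro ((h | h) | ⟨u', hu', h⟩)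
        · exact Or.inl h
        · exact Or.inr ⟨u, by simp, h⟩
        · exact Or.inr ⟨u', List.mem_cons_of_mem _ hu', h⟩
      · rintro (h | ⟨u', hu', h⟩)
        · exact Or.inl (Or.inl h)
        · rcases List.mem_cons.mp hu' with rfl | hu''
          · exact Or.inl (Or.inr h)
          · exact Or.inr ⟨u', hu'', h⟩
  rw [outer]
  simp

def FrontOK (s : String) (words : List String) (found : List Int)
    (frontier : List (List Int)) (k : Nat) : Prop :=
  ∀ u, u ∈ frontier ↔
    ∃ C, Chain words s.toList found C ∧ C.length = k ∧
      u = PySem.List.sorted C (fun x => x) false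

theorem sw_iff (s : String) (words : List String) (i : Int) (m : Nat) :
    (PySem.Str.startswith (PySem.Str.slice s (some ((m : Nat) : Int)) none)
      ((PySem.List.pyGet? words i).getD "") = true) ↔
      wordL words i <+: s.toList.drop m := by
  have ht : (PySem.Str.slice s (some ((m : Nat) : Int)) none).toList = s.toList.drop m := by
    simp [PySem.Str.toList_slice, PySem.List.slice_from_natCast]
  rw [PySem.Str.startswith_eq, ht, PySem.Chars.startswith_iff]
  rfl

theorem step_front (s : String) (words : List String) (found : List Int)
    (frontier : List (List Int)) (k : Nat)
    (h : FrontOK s words found frontier k) :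
    FrontOK s words found
      (alt_step s words
        ((PySem.List.pyRange 0 (PySem.List.len words) 1).filter (fun i => !(PySem.Set.contains found i)))
        frontier) (k + 1) := by
  intro x
  rw [mem_alt_step]
  constructor
  · rintro ⟨u, hu, i, hiAv, hniu, hsw, rfl⟩
    obtain ⟨C, hC, hlC, rfl⟩ := (h u).mp hu
    have hperm : (PySem.List.sorted C (fun x => x) false).Perm C := PySem.List.sorted_perm C _ _
    have hniC : i ∉ C := fun hm => hniu (hperm.mem_iff.mpr hm)
    have hsum : sumLen words (PySem.List.sorted C (fun x => x) false) = sumLen words C :=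
      (hperm.map _).sum_eq
    rw [hsum, sw_iff] at hsw
    obtain ⟨hi0, hi1, hinf⟩ := (mem_availB words found i).mp hiAv
    refine ⟨C ++ [i], chain_snoc hC hi0 hi1 hinf hniC hsw, by simp [hlC], ?_⟩
    exact PySem.List.sorted_eq_sorted_of_perm _ _ _ (fun a b hab => hab) (hperm.append_right [i])
  · rintro ⟨C', hC', hl', rfl⟩
    rcases List.eq_nil_or_concat C' with rfl | ⟨L, b, rfl⟩
    · simp at hl'
    · obtain ⟨hL, hb0, hb1, hbf, hbL, hbp⟩ := chain_unsnoc (by simpa using hC')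
      have hlL : L.length = k := by simpa using hl'
      have hperm : (PySem.List.sorted L (fun x => x) false).Perm L := PySem.List.sorted_perm L _ _
      refine ⟨PySem.List.sorted L (fun x => x) false, (h _).mpr ⟨L, hL, hlL, rfl⟩, b,
        (mem_availB words found b).mpr ⟨hb0, hb1, hbf⟩, fun hm => hbL (hperm.mem_iff.mp hm), ?_, ?_⟩
      · have hsum : sumLen words (PySem.List.sorted L (fun x => x) false) = sumLen words L :=
          (hperm.map _).sum_eq
        rw [hsum, sw_iff]
        exact hbp
      · rw [List.concat_eq_append]
        exact (PySem.List.sorted_eq_sorted_of_perm _ _ _ (fun a b hab => hab) (hperm.append_right [b])).symm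

theorem loopB_iff (s : String) (words : List String) (found : List Int) :
    ∀ (k : Nat) (frontier : List (List Int)) (t : Nat),
    FrontOK s words found frontier t → frontier ≠ [] →
    (alt_loop s words
        ((PySem.List.pyRange 0 (PySem.List.len words) 1).filter (fun i => !(PySem.Set.contains found i)))
        k frontier = true ↔
      ∃ C, Chain words s.toList found C ∧ C.length = t + k) := by
  intro k
  induction k with
  | zero =>
    intro frontier t h hne
    rw [alt_loop]
    constructor
    · intro _
      obtain ⟨u, hu⟩ := List.exists_mem_of_ne_nil _ hne
      obtain ⟨C, hC, hl, _⟩ := (h u).mp hu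
      exact ⟨C, hC, by omega⟩
    · intro _; rfl
  | succ k ih =>
    intro frontier t h hne
    rw [alt_loop]
    have hstep := step_front s words found frontier t h
    by_cases hE : (alt_step s words
        ((PySem.List.pyRange 0 (PySem.List.len words) 1).filter (fun i => !(PySem.Set.contains found i)))
        frontier).isEmpty
    · simp only [hE, if_true]
      constructor
      · intro h'; cases h'
      · rintro ⟨C, hC, hl⟩
        exfalso
        have htake : Chain words s.toList found (C.take (t + 1)) := by
          have : C = C.take (t + 1) ++ C.drop (t + 1) := (List.take_append_drop _ _).symm
          exact chain_append_left (this ▸ hC)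
        have hltake : (C.take (t + 1)).length = t + 1 := by
          rw [List.length_take]; omega
        have hmem := (hstep (PySem.List.sorted (C.take (t + 1)) (fun x => x) false)).mpr
          ⟨C.take (t + 1), htake, hltake, rfl⟩
        rw [List.isEmpty_iff] at hE
        rw [hE] at hmem
        exact (List.not_mem_nil) hmem
    · simp only [hE, Bool.false_eq_true, if_false]
      rw [ih _ (t + 1) hstep (fun hnil => hE (by rw [hnil]; rfl))]
      constructor
      · rintro ⟨C, hC, hl⟩; exact ⟨C, hC, by omega⟩
      · rintro ⟨C, hC, hl⟩; exact ⟨C, hC, by omega⟩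

theorem B_iff (s : String) (words : List String) (found : List Int) :
    check_words_alt s words found = true ↔
      (found.length < words.length ∧
        ∃ C, Chain words s.toList found C ∧ C.length = words.length - found.length) := by
  unfold check_words_alt
  simp only []
  by_cases hle : (PySem.List.len words : Int) - PySem.List.len found ≤ 0
  · have hge : words.length ≤ found.length := by simp [PySem.List.len] at hle; omega
    simp only [hle, if_true]
    simp; omega
  · have hlt : found.length < words.length := by simp [PySem.List.len] at hle; omega
    simp only [hle, if_false]
    have hfr : FrontOK s words found [[]] 0 := by
      intro u
      constructor
      · intro hu
        have : u = [] := by simpa using hu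
        subst this
        exact ⟨[], Chain.nil _ _, rfl, by decide⟩
      · rintro ⟨C, hC, hl, rfl⟩
        have hC0 : C = [] := List.eq_nil_of_length_eq_zero hl
        subst hC0
        exact List.mem_singleton.mpr (by decide)
    rw [loopB_iff s words found _ [[]] 0 hfr (by simp)]
    have htn : ((PySem.List.len words : Int) - PySem.List.len found).toNat = words.length - found.length := by
      simp [PySem.List.len]
    rw [htn]
    simp [hlt]

-- ===== VERDICT (by name: the statement is the Claim_ definition above) =====
theorem check_words_spec : Claim_equal_check_words := by
  intro s words found _
  unfold Spec_check_words
  exact Bool.eq_iff_iff.mpr ((A_iff s words found).trans (B_iff s words found).symm)
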